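-- pv_equiv track=rewrite | github.com/queboth/KWS | IUIKeywordSpottingMENS/iui/utils/KeywordSpottingMatrixUtils.py | compress_sub_sequences
-- ===== SOURCE A (Python) =====
-- def compress_sub_sequences(seq):
--
--     result = []
--     start = None
--
--     for num in seq:
--         if start is None:
--             start = num
--         elif num != seq[-1]:
--             continue
--         else:
--             result.append([start, num])
--             start = None
--
--     return result
-- ===== SOURCE B (Python) =====
-- def compress_sub_sequences(seq):
--     if not seq:
--         return []
--     last = seq[-1]
--     result = []
--     it = iter(seq)
--     for start in it:
--         for num in it:
--             if num == last:
--                 result.append([start, num])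
--                 break
--     return result
-- ===== Notes on version B (the rewrite author's own statement) =====
-- stated objective: alternative
-- what changed: Replaces the single fold with an Option-typed open-start state by nested iterator loops: the outer loop grabs each opening element, the inner loop skips forward on a shared iterator until the last value closes the pair, so no sentinel state is carried.
import Mathlib
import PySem

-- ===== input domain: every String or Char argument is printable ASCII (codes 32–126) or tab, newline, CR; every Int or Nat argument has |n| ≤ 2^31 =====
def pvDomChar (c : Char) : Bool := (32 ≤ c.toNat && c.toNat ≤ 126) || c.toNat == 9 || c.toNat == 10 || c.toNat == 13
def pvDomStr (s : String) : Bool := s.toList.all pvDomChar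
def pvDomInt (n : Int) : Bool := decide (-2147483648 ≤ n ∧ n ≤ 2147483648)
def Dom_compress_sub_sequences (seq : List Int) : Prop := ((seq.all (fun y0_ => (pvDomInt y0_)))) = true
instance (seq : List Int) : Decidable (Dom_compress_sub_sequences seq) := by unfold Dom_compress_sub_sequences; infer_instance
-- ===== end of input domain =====

-- B replaces A's single fold with Option-typed open-start state by nested loops on a
-- shared iterator (outer grabs a start, inner scans to the closing last value); same cost.

-- ===== PORT A =====
-- literal port of A: one fold carrying (result, start : Option Int), comparing num with seq[-1]
def compress_sub_sequences (seq : List Int) : List (List Int) :=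
  (seq.foldl
    (fun (st : List (List Int) × Option Int) num =>
      match st.2 with
      | none => (st.1, some num)
      | some start =>
        if some num ≠ PySem.List.pyGet? seq (-1) then (st.1, some start)
        else (st.1 ++ [[start, num]], none))
    ([], none)).1

-- ===== PORT B =====
mutual
-- outer loop: grab the next opening element
def pvAltOuter (last : Int) : List Int → List (List Int)
  | [] => []
  | start :: rest => pvAltInner last start rest
termination_by l => l.length
-- inner loop: skip until the last value closes the pair
def pvAltInner (last : Int) (start : Int) : List Int → List (List Int)
  | [] => []
  | num :: rest =>
      if num = last then [start, num] :: pvAltOuter last rest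
      else pvAltInner last start rest
termination_by l => l.length
end

def compress_sub_sequences_alt (seq : List Int) : List (List Int) :=
  match seq.getLast? with
  | none => []
  | some last => pvAltOuter last seq

-- ===== PRECONDITION & SPEC =====
def Spec_compress_sub_sequences (seq : List Int) (out : List (List Int)) : Prop := out = compress_sub_sequences_alt seq
instance (seq : List Int) (out : List (List Int)) : Decidable (Spec_compress_sub_sequences seq out) := by unfold Spec_compress_sub_sequences; infer_instance

-- ===== CLAIM (what is proved, stated in full; the proofs are below) =====
def Claim_equal_compress_sub_sequences : Prop := ∀ (seq : List Int), Dom_compress_sub_sequences seq → Spec_compress_sub_sequences seq (compress_sub_sequences seq)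

-- ===== LEMMAS AND PROOFS =====

theorem pv_fold_eq (seq : List Int) (last : Int)
    (h : PySem.List.pyGet? seq (-1) = some last) :
    ∀ (l : List Int) (acc : List (List Int)) (st : Option Int),
      (l.foldl
        (fun (st : List (List Int) × Option Int) num =>
          match st.2 with
          | none => (st.1, some num)
          | some start =>
            if some num ≠ PySem.List.pyGet? seq (-1) then (st.1, some start)
            else (st.1 ++ [[start, num]], none))
        (acc, st)).1
      = acc ++ (match st with
                | none => pvAltOuter last l
                | some s => pvAltInner last s l) := by
  intro l
  induction l with
  | nil =>
    intro acc st
    cases st <;> simp [pvAltOuter, pvAltInner]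
  | cons num rest ih =>
    intro acc st
    cases st with
    | none =>
      simpa [pvAltOuter, List.foldl_cons] using ih acc (some num)
    | some s =>
      by_cases hnum : num = last
      · subst hnum
        have hc : ¬ (some num ≠ PySem.List.pyGet? seq (-1)) := by rw [h]; simp
        simp only [List.foldl_cons, if_neg hc]
        rw [ih (acc ++ [[s, num]]) none]
        simp [pvAltInner]
      · have : (some num ≠ PySem.List.pyGet? seq (-1)) := by
          rw [h]; simpa using hnum
        simp only [List.foldl_cons, if_pos this]
        rw [ih acc (some s)]
        simp [pvAltInner, hnum]

-- ===== VERDICT (by name: the statement is the Claim_ definition above) =====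
theorem compress_sub_sequences_spec : Claim_equal_compress_sub_sequences := by
  intro seq _
  unfold Spec_compress_sub_sequences compress_sub_sequences compress_sub_sequences_alt
  cases hl : seq.getLast? with
  | none =>
    have : seq = [] := List.getLast?_eq_none_iff.mp hl
    subst this; simp
  | some last =>
    have h : PySem.List.pyGet? seq (-1) = some last := by
      rw [PySem.List.pyGet?_neg_one, hl]
    simpa using pv_fold_eq seq last h seq [] none
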